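-- pv_equiv track=rewrite | github.com/algowizzzz/auraneo4j_pinecone_aws_lovable | agent/nodes/parallel_runner.py | _extract_sub_topics
-- ===== SOURCE A (Python) =====
-- from typing import List, Dict, Any
--
-- def _extract_sub_topics(query: str) -> List[str]:
--     """
--     Extract individual topics from a multi-topic query.
--     Handles various separators and conjunction patterns.
--     """
--     # Common separators and conjunctions
--     separators = [' and ', ' & ', ' + ', ', ', ';']
--
--     # Start with the original query
--     topics = [query.strip()]
--
--     # Split by each separator
--     for separator in separators:
--         new_topics = []
--         for topic in topics:
--             if separator in topic.lower():
--                 split_topics = [t.strip() for t in topic.split(separator) if t.strip()]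
--                 new_topics.extend(split_topics)
--             else:
--                 new_topics.append(topic)
--         topics = new_topics
--
--     # Filter out very short topics and duplicates
--     filtered_topics = []
--     seen = set()
--     for topic in topics:
--         if len(topic) > 10 and topic.lower() not in seen:  # Minimum meaningful length
--             filtered_topics.append(topic)
--             seen.add(topic.lower())
--
--     # If we couldn't extract meaningful sub-topics, return the original
--     if not filtered_topics:
--         return [query]
--
--     return filtered_topics
-- ===== SOURCE B (Python) =====
-- from typing import List
--
-- _SEPARATORS = (' and ', ' & ', ' + ', ', ', ';')
--
-- def _extract_sub_topics(query: str) -> List[str]: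
--     """Recursive depth-first split by separator priority, dict-based dedupe."""
--     def burst(piece, seps):
--         if not seps:
--             return [piece]
--         out = []
--         for part in piece.split(seps[0]):
--             part = part.strip()
--             if part:
--                 out.extend(burst(part, seps[1:]))
--         return out
--
--     uniq = {}
--     for topic in burst(query.strip(), _SEPARATORS):
--         key = topic.lower()
--         if len(topic) > 10 and key not in uniq:
--             uniq[key] = topic
--     return list(uniq.values()) or [query]
-- ===== Notes on version B (the rewrite author's own statement) =====
-- stated objective: simpler
-- what changed: A's five sequential whole-list splitting passes (one per separator, with a redundant lowercased containment test before each split) become a single depth-first recursion over the separator list, and the parallel filtered-list-plus-seen-set dedupe loop becomes one insertion-ordered dict whose values are the result.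
import Mathlib
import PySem

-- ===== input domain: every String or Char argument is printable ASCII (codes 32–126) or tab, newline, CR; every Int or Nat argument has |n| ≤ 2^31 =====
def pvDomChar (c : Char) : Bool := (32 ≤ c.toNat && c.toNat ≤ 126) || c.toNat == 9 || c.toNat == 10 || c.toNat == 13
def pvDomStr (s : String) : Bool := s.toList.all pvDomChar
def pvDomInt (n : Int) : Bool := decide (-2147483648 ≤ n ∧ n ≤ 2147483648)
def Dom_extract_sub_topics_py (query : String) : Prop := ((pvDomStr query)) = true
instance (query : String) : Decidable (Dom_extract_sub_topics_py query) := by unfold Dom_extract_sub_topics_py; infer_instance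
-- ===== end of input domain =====

-- B replaces A's five sequential whole-list splitting passes by a single depth-first
-- recursion over the separator list and its list-plus-set dedupe by one insertion-ordered
-- dict; objective: simpler (same behaviour on every input, both are total).

-- ===== PORT A =====

-- s.split(sep) for a nonempty sep (all separators below are nonempty literals); exact wrapper over PySem.Chars.splitOn
def pvStrSplit (s sep : String) : List String :=
  (PySem.Chars.splitOn s.toList sep.toList).map String.ofList

def pvSeparators : List String := [" and ", " & ", " + ", ", ", ";"]

def extract_sub_topics_py (query : String) : List String :=
  -- topics = [query.strip()]; for separator in separators: … (inner loop builds new_topics)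
  let topics := pvSeparators.foldl (fun topics separator =>
      topics.foldl (fun new_topics topic =>
        if PySem.Str.isIn separator (PySem.Str.lower topic) then
          new_topics ++ ((pvStrSplit topic separator).map PySem.Str.strip).filter (fun t => t ≠ "")
        else
          new_topics ++ [topic]) [])
    [PySem.Str.strip query]
  -- filtered_topics / seen loop
  let fs := topics.foldl (fun (p : List String × PySem.Set String) topic =>
      if 10 < PySem.Str.len topic ∧ ¬ PySem.Set.contains p.2 (PySem.Str.lower topic) = true then
        (p.1 ++ [topic], PySem.Set.add p.2 (PySem.Str.lower topic))
      else p) ([], PySem.Set.empty)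
  if fs.1 = [] then [query] else fs.1

-- ===== PORT B =====

-- burst(piece, seps) from Source B: depth-first split by separator priority
def pvBurst : List String → String → List String
  | [], piece => [piece]
  | sep :: rest, piece =>
      (pvStrSplit piece sep).foldl (fun out part =>
        let p := PySem.Str.strip part
        if p ≠ "" then out ++ pvBurst rest p else out) []

def extract_sub_topics_py_alt (query : String) : List String :=
  let uniq := (pvBurst pvSeparators (PySem.Str.strip query)).foldl
      (fun (d : PySem.Dict String String) topic =>
        let key := PySem.Str.lower topic
        if 10 < PySem.Str.len topic ∧ ¬ d.contains key = true then d.insert key topic else d)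
      PySem.Dict.empty
  if uniq.values = [] then [query] else uniq.values

-- ===== PRECONDITION & SPEC =====
def Spec_extract_sub_topics_py (query : String) (out : List String) : Prop := out = extract_sub_topics_py_alt query
instance (query : String) (out : List String) : Decidable (Spec_extract_sub_topics_py query out) := by unfold Spec_extract_sub_topics_py; infer_instance

-- ===== CLAIM (what is proved, stated in full; the proofs are below) =====
def Claim_equal_extract_sub_topics_py : Prop := ∀ (query : String), Dom_extract_sub_topics_py query → Spec_extract_sub_topics_py query (extract_sub_topics_py query)

-- ===== LEMMAS AND PROOFS =====

-- splitOn.go never finds the separator: the whole remaining string is one piece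
lemma pv_go_no_match (sep : List Char) (fuel : Nat) (l cur : List Char) (acc : List (List Char))
    (h : ¬ sep <:+: l) :
    PySem.Chars.splitOn.go sep fuel l cur acc = ((cur.reverse ++ l) :: acc).reverse := by
  induction fuel generalizing l cur with
  | zero => rw [PySem.Chars.splitOn.go.eq_def]
  | succ n ih =>
    cases l with
    | nil => rw [PySem.Chars.splitOn.go.eq_def]; simp
    | cons c rest =>
      rw [PySem.Chars.splitOn.go.eq_def]
      have hp : sep.isPrefixOf (c :: rest) = false := by
        apply Bool.eq_false_iff.mpr
        intro hpre
        exact h (List.isPrefixOf_iff_prefix.mp hpre).isInfix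
      simp only [hp, Bool.false_eq_true, if_false]
      rw [ih rest (c :: cur) (fun hinf => h (hinf.trans (List.suffix_cons c rest).isInfix))]
      simp

lemma pv_splitOn_not_infix (s sep : List Char) (h : ¬ sep <:+: s) :
    PySem.Chars.splitOn s sep = [s] := by
  unfold PySem.Chars.splitOn
  rw [pv_go_no_match sep _ s [] [] h]
  simp

lemma pv_strSplit_not_infix (s sep : String) (h : ¬ sep.toList <:+: s.toList) :
    (pvStrSplit s sep) = [s] := by
  unfold pvStrSplit
  rw [pv_splitOn_not_infix _ _ h]
  simp

-- strip is idempotent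
lemma pv_dropWhile_dropWhile {α : Type} (p : α → Bool) (l : List α) :
    List.dropWhile p (List.dropWhile p l) = List.dropWhile p l := by
  induction l with
  | nil => simp
  | cons a t ih =>
    by_cases hp : p a = true
    · simp [hp, ih]
    · simp [hp]

lemma pv_rstrip_rstrip (s : List Char) :
    PySem.Chars.rstrip (PySem.Chars.rstrip s) = PySem.Chars.rstrip s := by
  unfold PySem.Chars.rstrip
  rw [List.reverse_reverse, pv_dropWhile_dropWhile]

lemma pv_lstrip_eq_self (s : List Char) (h : ∀ c, s.head? = some c → PySem.Chars.isspace c = false) :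
    PySem.Chars.lstrip s = s := by
  unfold PySem.Chars.lstrip
  cases s with
  | nil => simp
  | cons a t => simp [h a rfl]

lemma pv_strip_strip (s : List Char) :
    PySem.Chars.strip (PySem.Chars.strip s) = PySem.Chars.strip s := by
  have hl : PySem.Chars.lstrip (PySem.Chars.strip s) = PySem.Chars.strip s := by
    apply pv_lstrip_eq_self
    intro c hc
    -- strip s = rstrip (lstrip s) is a prefix of lstrip s, whose head is not a space
    have hpre : PySem.Chars.rstrip (PySem.Chars.lstrip s) <+: PySem.Chars.lstrip s := by
      unfold PySem.Chars.rstrip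
      have hsuf := (List.dropWhile_suffix (l := (PySem.Chars.lstrip s).reverse) PySem.Chars.isspace)
      have : (List.dropWhile PySem.Chars.isspace (PySem.Chars.lstrip s).reverse).reverse <+:
          (PySem.Chars.lstrip s).reverse.reverse := List.reverse_prefix.mpr (by simpa using hsuf)
      simpa using this
    have hhead : (PySem.Chars.lstrip s).head? = some c := by
      rcases hpre with ⟨t, ht⟩
      rw [← ht]
      have hc' : (PySem.Chars.rstrip (PySem.Chars.lstrip s)).head? = some c := hc
      cases hmm : PySem.Chars.rstrip (PySem.Chars.lstrip s) with
      | nil => rw [hmm] at hc'; simp at hc'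
      | cons a u =>
        rw [hmm] at hc'
        simp at hc' ⊢
        exact hc'
    unfold PySem.Chars.lstrip at hhead
    have := List.head?_dropWhile_not PySem.Chars.isspace s
    rw [hhead] at this
    simpa using this
  show PySem.Chars.rstrip (PySem.Chars.lstrip (PySem.Chars.strip s)) = PySem.Chars.strip s
  rw [hl]
  unfold PySem.Chars.strip
  exact pv_rstrip_rstrip _

lemma pv_strip_idem (s : String) :
    PySem.Str.strip (PySem.Str.strip s) = PySem.Str.strip s := by
  apply String.toList_inj.mp
  simp only [PySem.Str.toList_strip]
  exact pv_strip_strip _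

-- a "clean" piece: stripped and nonempty (invariant of every intermediate topic list)
def pvClean (t : String) : Prop := PySem.Str.strip t = t ∧ t ≠ ""

-- one split-strip-filter step shared by both readings
def pvOneSplit (t sep : String) : List String :=
  ((pvStrSplit t sep).map PySem.Str.strip).filter (fun x => x ≠ "")

def pvGA (sep t : String) : List String :=
  if PySem.Str.isIn sep (PySem.Str.lower t) then pvOneSplit t sep else [t]

def pvPassA (ts : List String) (sep : String) : List String := ts.flatMap (pvGA sep)

lemma pv_innerA (ts : List String) (sep : String) :
    ts.foldl (fun new_topics topic =>
        if PySem.Str.isIn sep (PySem.Str.lower topic) then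
          new_topics ++ ((pvStrSplit topic sep).map PySem.Str.strip).filter (fun t => t ≠ "")
        else
          new_topics ++ [topic]) [] = pvPassA ts sep := by
  have hfg : ∀ (acc : List String) (t : String), t ∈ ts →
      (if PySem.Str.isIn sep (PySem.Str.lower t) then
        acc ++ ((pvStrSplit t sep).map PySem.Str.strip).filter (fun x => x ≠ "")
      else acc ++ [t]) = acc ++ pvGA sep t := by
    intro acc t _
    unfold pvGA pvOneSplit
    by_cases hin : PySem.Str.isIn sep (PySem.Str.lower t) = true
    · rw [if_pos hin, if_pos hin]
    · rw [if_neg hin, if_neg hin]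
  have h2 := PySem.List.foldl_congr_mem ts _ (fun acc t => acc ++ pvGA sep t) [] hfg
  rw [h2, PySem.List.foldl_append_eq_flatMap]
  rfl

lemma pv_clean_oneSplit (t sep x : String) (hx : x ∈ pvOneSplit t sep) : pvClean x := by
  unfold pvOneSplit at hx
  simp only [List.mem_filter, List.mem_map] at hx
  obtain ⟨⟨y, _, rfl⟩, hne⟩ := hx
  exact ⟨pv_strip_idem y, by simpa using hne⟩

lemma pv_seps_lower : ∀ s ∈ pvSeparators, PySem.Chars.lower s.toList = s.toList := by decide

lemma pv_gA_clean (sep t : String) (hsep : sep ∈ pvSeparators) (ht : pvClean t) :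
    pvGA sep t = pvOneSplit t sep := by
  unfold pvGA
  split
  · rfl
  · rename_i hin
    have hnotin : ¬ sep.toList <:+: t.toList := by
      intro hinf
      apply hin
      rw [PySem.Str.isIn_iff_infix]
      have := hinf.map PySem.Chars.lowerChar
      rw [show t.toList.map PySem.Chars.lowerChar = PySem.Chars.lower t.toList from rfl,
          show sep.toList.map PySem.Chars.lowerChar = PySem.Chars.lower sep.toList from rfl,
          pv_seps_lower sep hsep, ← PySem.Str.toList_lower] at this
      exact this
    unfold pvOneSplit
    rw [pv_strSplit_not_infix t sep hnotin]
    simp [ht.1, ht.2]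

lemma pv_burst_cons (sep : String) (rest : List String) (t : String) :
    pvBurst (sep :: rest) t = (pvOneSplit t sep).flatMap (pvBurst rest) := by
  show (pvStrSplit t sep).foldl (fun out part =>
        let p := PySem.Str.strip part
        if p ≠ "" then out ++ pvBurst rest p else out) [] = _
  rw [← List.foldl_map (f := PySem.Str.strip)
      (g := fun out p => if p ≠ "" then out ++ pvBurst rest p else out)]
  rw [PySem.List.foldl_ite_eq_foldl_filter (p := fun p => p ≠ "")
      (f := fun out p => out ++ pvBurst rest p)]
  rw [PySem.List.foldl_append_eq_flatMap]
  rfl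

lemma pv_main (seps : List String) (hseps : ∀ s ∈ seps, s ∈ pvSeparators) (xs : List String)
    (hxs : ∀ t ∈ xs, pvClean t) :
    seps.foldl pvPassA xs = xs.flatMap (pvBurst seps) := by
  induction seps generalizing xs with
  | nil =>
    show xs = xs.flatMap (fun t => [t])
    simp
  | cons sep rest ih =>
    have hsep : sep ∈ pvSeparators := hseps sep (by simp)
    rw [List.foldl_cons]
    rw [ih (fun s hs => hseps s (by simp [hs]))
        (pvPassA xs sep)
        (by
          intro t htmem
          unfold pvPassA at htmem
          simp only [List.mem_flatMap] at htmem
          obtain ⟨y, hy, hty⟩ := htmem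
          rw [pv_gA_clean sep y hsep (hxs y hy)] at hty
          exact pv_clean_oneSplit y sep t hty)]
    unfold pvPassA
    rw [List.flatMap_assoc]
    apply List.flatMap_congr
    intro t htmem
    rw [pv_gA_clean sep t hsep (hxs t htmem), pv_burst_cons]

lemma pv_dedupe (pieces : List String) (acc : List String) (d : PySem.Dict String String)
    (hv : acc = d.values) :
    (pieces.foldl (fun (p : List String × PySem.Set String) topic =>
        if 10 < PySem.Str.len topic ∧ ¬ PySem.Set.contains p.2 (PySem.Str.lower topic) = true then
          (p.1 ++ [topic], PySem.Set.add p.2 (PySem.Str.lower topic))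
        else p) (acc, d.keys)).1
      = (pieces.foldl (fun (d : PySem.Dict String String) topic =>
          let key := PySem.Str.lower topic
          if 10 < PySem.Str.len topic ∧ ¬ d.contains key = true then d.insert key topic else d) d).values := by
  induction pieces generalizing acc d with
  | nil => simpa using hv
  | cons t rest ih =>
    simp only [List.foldl_cons]
    have hcond : (PySem.Set.contains (PySem.Dict.keys d) (PySem.Str.lower t) = true)
        ↔ (d.contains (PySem.Str.lower t) = true) := by
      simp [PySem.Set.contains, PySem.Dict.contains_eq_decide_mem_keys]
    by_cases hc : 10 < PySem.Str.len t ∧ ¬ d.contains (PySem.Str.lower t) = true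
    · have hnc : d.contains (PySem.Str.lower t) = false := by
        rcases hc with ⟨_, h2⟩; exact Bool.not_eq_true _ ▸ (by simpa using h2)
      rw [if_pos (by exact ⟨hc.1, fun hx => hc.2 (hcond.mp hx)⟩), if_pos hc]
      have hk : PySem.Set.add (PySem.Dict.keys d) (PySem.Str.lower t)
          = (d.insert (PySem.Str.lower t) t).keys := by
        unfold PySem.Set.add
        rw [if_neg (by rw [hcond]; simp [hnc]),
            PySem.Dict.keys_insert_of_not_contains d t hnc]
      have hv' : acc ++ [t] = (d.insert (PySem.Str.lower t) t).values := by
        show _ = ((d.insert (PySem.Str.lower t) t).items).map (fun x => x.2)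
        rw [PySem.Dict.items_insert_of_not_contains d t hnc]
        simp [hv, PySem.Dict.values]
      rw [show ((acc, PySem.Dict.keys d).1 ++ [t],
            PySem.Set.add (acc, PySem.Dict.keys d).2 (PySem.Str.lower t))
          = (acc ++ [t], (d.insert (PySem.Str.lower t) t).keys) from by rw [← hk]]
      exact ih (acc ++ [t]) (d.insert (PySem.Str.lower t) t) hv'
    · rw [if_neg (fun hx => hc ⟨hx.1, fun hy => hx.2 (hcond.mpr hy)⟩), if_neg hc]
      exact ih acc d hv

theorem extract_sub_topics_py_spec : Claim_equal_extract_sub_topics_py := by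
  intro query _
  show extract_sub_topics_py query = extract_sub_topics_py_alt query
  unfold extract_sub_topics_py extract_sub_topics_py_alt
  have hout : (fun (topics : List String) (separator : String) =>
      topics.foldl (fun new_topics topic =>
        if PySem.Str.isIn separator (PySem.Str.lower topic) then
          new_topics ++ ((pvStrSplit topic separator).map PySem.Str.strip).filter (fun t => t ≠ "")
        else
          new_topics ++ [topic]) []) = pvPassA := by
    funext ts sep; exact pv_innerA ts sep
  rw [hout]
  dsimp only
  by_cases h : PySem.Str.strip query = ""
  · rw [h]
    have h1 : pvSeparators.foldl pvPassA [""] = [""] := by decide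
    have h2 : pvBurst pvSeparators "" = [] := by decide
    rw [h1, h2]
    simp [PySem.Str.len, show (PySem.Dict.empty : PySem.Dict String String).values = [] from rfl]
  · have htopics : pvSeparators.foldl pvPassA [PySem.Str.strip query]
        = pvBurst pvSeparators (PySem.Str.strip query) := by
      rw [pv_main pvSeparators (fun s hs => hs) [PySem.Str.strip query]
          (by intro t ht; simp at ht; subst ht; exact ⟨pv_strip_idem query, h⟩)]
      simp
    rw [htopics]
    rw [show (([] : List String), (PySem.Set.empty : PySem.Set String))
        = (([] : List String), (PySem.Dict.empty : PySem.Dict String String).keys) from rfl]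
    rw [pv_dedupe (pvBurst pvSeparators (PySem.Str.strip query)) [] PySem.Dict.empty rfl]
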